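-- pv_equiv track=rewrite | github.com/bobbyjudd/aoc2024 | 1/1.py | part_2
-- ===== SOURCE A (Python) =====
-- from typing import List
--
-- def part_2(left_list: List[int], right_list: List[int]) -> int:
--     right_id_count_map = {}
--     for id in right_list:
--         if id not in right_id_count_map:
--             right_id_count_map[id] = 0
--         right_id_count_map[id] += 1
--
--     return sum(
--         [
--             id * (right_id_count_map[id] if id in right_id_count_map else 0)
--             for id in left_list
--         ]
--     )
-- ===== SOURCE B (Python) =====
-- from typing import List
--
-- def part_2(left_list: List[int], right_list: List[int]) -> int:
--     # Sort both lists and do a two-pointer merge over equal runs: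
--     # each common value v contributes v * (#v in left) * (#v in right).
--     L = sorted(left_list)
--     R = sorted(right_list)
--     total = 0
--     i = j = 0
--     n, m = len(L), len(R)
--     while i < n and j < m:
--         if L[i] < R[j]:
--             i += 1
--         elif R[j] < L[i]:
--             j += 1
--         else:
--             v = L[i]
--             i0, j0 = i, j
--             while i < n and L[i] == v:
--                 i += 1
--             while j < m and R[j] == v:
--                 j += 1
--             total += v * (i - i0) * (j - j0)
--     return total
-- ===== Notes on version B (the rewrite author's own statement) =====
-- stated objective: alternative
-- what changed: B sorts both lists and computes the score by a two-pointer merge over equal runs (v * left_run * right_run per common value), replacing A's hash-count map plus per-element lookup pass.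
import Mathlib
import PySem

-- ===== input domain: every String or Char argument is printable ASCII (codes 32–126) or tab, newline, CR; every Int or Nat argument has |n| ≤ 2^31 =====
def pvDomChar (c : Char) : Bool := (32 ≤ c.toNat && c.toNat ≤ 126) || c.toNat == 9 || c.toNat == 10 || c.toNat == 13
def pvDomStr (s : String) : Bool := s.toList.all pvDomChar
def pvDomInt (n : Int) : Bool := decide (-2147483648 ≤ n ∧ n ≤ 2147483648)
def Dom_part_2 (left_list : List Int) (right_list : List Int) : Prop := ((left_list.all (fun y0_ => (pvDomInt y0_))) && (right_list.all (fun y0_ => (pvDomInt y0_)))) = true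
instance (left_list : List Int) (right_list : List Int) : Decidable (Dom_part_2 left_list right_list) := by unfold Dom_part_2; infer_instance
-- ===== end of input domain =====

-- B sorts both lists and computes the score by a two-pointer merge over equal
-- runs (v * left_run * right_run per common value), instead of A's hash-count
-- map plus per-element lookup pass.

-- ===== PORT A =====
def part_2 (left_list : List Int) (right_list : List Int) : Int :=
  let right_id_count_map :=
    right_list.foldl (fun d id =>
      let d := if d.contains id then d else d.insert id 0
      d.insert id (d.getD id 0 + 1)) PySem.Dict.empty
  (left_list.map (fun id =>
    id * (if right_id_count_map.contains id then right_id_count_map.getD id 0 else 0))).sum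

-- ===== PORT B =====
-- the inner `while L[i] == v` loops: strip the leading run of v, returning its
-- length (i - i0) and the remaining suffix
def stripRun (v : Int) : List Int → Nat × List Int
  | [] => (0, [])
  | x :: xs =>
    if x = v then
      let p := stripRun v xs
      (p.1 + 1, p.2)
    else (0, x :: xs)

-- termination measure for the merge loop (cited by decreasing_by)
theorem stripRun_length_le (v : Int) (l : List Int) : (stripRun v l).2.length ≤ l.length := by
  induction l with
  | nil => simp [stripRun]
  | cons x xs ih =>
    by_cases h : x = v
    · simp [stripRun, h]; omega
    · simp [stripRun, h]

-- the outer two-pointer while loop of Source B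
def mergeSim : List Int → List Int → Int
  | [], _ => 0
  | _ :: _, [] => 0
  | x :: xs, y :: ys =>
    if x < y then mergeSim xs (y :: ys)
    else if y < x then mergeSim (x :: xs) ys
    else
      let p := stripRun x xs
      let q := stripRun y ys
      x * ((p.1 : Int) + 1) * ((q.1 : Int) + 1) + mergeSim p.2 q.2
termination_by L R => L.length + R.length
decreasing_by
  all_goals
    have h1 := stripRun_length_le x xs
    have h2 := stripRun_length_le y ys
    simp only [List.length_cons]
    omega

def part_2_alt (left_list : List Int) (right_list : List Int) : Int :=
  mergeSim (PySem.List.sorted left_list (fun x => x) false)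
           (PySem.List.sorted right_list (fun x => x) false)

-- ===== PRECONDITION & SPEC =====
def Spec_part_2 (left_list : List Int) (right_list : List Int) (out : Int) : Prop := out = part_2_alt left_list right_list
instance (left_list : List Int) (right_list : List Int) (out : Int) : Decidable (Spec_part_2 left_list right_list out) := by unfold Spec_part_2; infer_instance

-- ===== CLAIM (what is proved, stated in full; the proofs are below) =====
def Claim_equal_part_2 : Prop := ∀ (left_list : List Int) (right_list : List Int), Dom_part_2 left_list right_list → Spec_part_2 left_list right_list (part_2 left_list right_list)

-- ===== LEMMAS AND PROOFS =====

-- A's dict-building step is exactly the getD+1-insert step.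
theorem stepA_eq (d : PySem.Dict Int Int) (id : Int) :
    (let d' := if d.contains id then d else d.insert id 0
     d'.insert id (d'.getD id 0 + 1)) = d.insert id (d.getD id 0 + 1) := by
  by_cases h : d.contains id = true
  · simp [h]
  · have h' : d.contains id = false := by simpa using h
    simp only [h', Bool.false_eq_true, if_false]
    rw [PySem.Dict.getD_insert_self, PySem.Dict.insert_insert_self,
        PySem.Dict.getD_of_not_contains _ _ h']

theorem foldA_eq (r : List Int) :
    r.foldl (fun d id =>
      let d := if d.contains id then d else d.insert id 0
      d.insert id (d.getD id 0 + 1)) PySem.Dict.empty = PySem.Dict.counter r := by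
  rw [← PySem.Dict.foldl_insert_getD_add_one_eq_counter]
  congr 1
  funext d id
  exact stepA_eq d id

-- A as a sum over the left list of id * (right count)
theorem part_2_eval (l r : List Int) :
    part_2 l r = (l.map (fun id => id * (r.count id : Int))).sum := by
  unfold part_2
  rw [foldA_eq]
  show (l.map (fun id =>
    id * (if (PySem.Dict.counter r).contains id = true then (PySem.Dict.counter r).getD id 0 else 0))).sum = _
  congr 1
  apply List.map_congr_left
  intro id _
  by_cases h : (PySem.Dict.counter r).contains id = true
  · simp [h, PySem.Dict.getD_counter]
  · have hc : r.count id = 0 := by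
      have := PySem.Dict.getD_counter (xs := r) (v := id)
      rw [PySem.Dict.getD_of_not_contains _ _ (by simpa using h)] at this
      exact_mod_cast this.symm
    simp [h, hc]

-- stripRun decomposition: l = replicate c v ++ rest, and rest does not start with v
theorem stripRun_decomp (v : Int) (l : List Int) :
    l = List.replicate (stripRun v l).1 v ++ (stripRun v l).2 := by
  induction l with
  | nil => simp [stripRun]
  | cons x xs ih =>
    by_cases h : x = v
    · simp [stripRun, h, List.replicate_succ]
      exact ih
    · simp [stripRun, h]

theorem stripRun_head_ne (v : Int) (l : List Int) :
    ∀ z t, (stripRun v l).2 = z :: t → z ≠ v := by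
  induction l with
  | nil => intro z t h; simp [stripRun] at h
  | cons x xs ih =>
    intro z t h
    by_cases hx : x = v
    · simp [stripRun, hx] at h
      exact ih z t h
    · simp [stripRun, hx] at h
      rw [← h.1]; exact hx

-- all elements of the stripped rest are strictly greater than v,
-- provided the original list is sorted and bounded below by v
theorem stripRun_sublist (v : Int) (l : List Int) : ((stripRun v l).2).Sublist l := by
  have h := List.sublist_append_right (List.replicate (stripRun v l).1 v) (stripRun v l).2
  rwa [← stripRun_decomp v l] at h

theorem stripRun_rest_gt (v : Int) (l : List Int)
    (hs : l.Pairwise (· ≤ ·)) (hb : ∀ z ∈ l, v ≤ z) :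
    ∀ z ∈ (stripRun v l).2, v < z := by
  have hsub := stripRun_sublist v l
  have hsrest : ((stripRun v l).2).Pairwise (· ≤ ·) := hs.sublist hsub
  rcases hrest : (stripRun v l).2 with _ | ⟨h0, t⟩
  · intro z hz; simp at hz
  · have hh0 : v < h0 := by
      have hne := stripRun_head_ne v l h0 t hrest
      have h1 : h0 ∈ l := hsub.subset (by rw [hrest]; exact List.mem_cons_self)
      have := hb h0 h1
      omega
    intro z hz
    rw [hrest] at hsrest
    rcases List.mem_cons.mp hz with h | h
    · omega
    · have := (List.pairwise_cons.mp hsrest).1 z h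
      omega

-- rest is sorted (suffix of a sorted list)
theorem stripRun_rest_sorted (v : Int) (l : List Int) (hs : l.Pairwise (· ≤ ·)) :
    ((stripRun v l).2).Pairwise (· ≤ ·) :=
  hs.sublist (stripRun_sublist v l)

-- the abbreviated similarity sum
theorem mergeSim_eq_sum (L R : List Int)
    (hL : L.Pairwise (· ≤ ·)) (hR : R.Pairwise (· ≤ ·)) :
    mergeSim L R = (L.map (fun z => z * (R.count z : Int))).sum := by
  induction L, R using mergeSim.induct with
  | case1 R => simp [mergeSim]
  | case2 x xs => simp [mergeSim]
  | case3 x xs y ys hlt ih =>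
    have hxtail := List.pairwise_cons.mp hL
    have hcount : (y :: ys).count x = 0 := by
      rw [List.count_eq_zero]
      intro hmem
      have hyz : y ≤ x := by
        rcases List.mem_cons.mp hmem with h | h
        · omega
        · have := (List.pairwise_cons.mp hR).1 x h; omega
      omega
    rw [mergeSim]
    simp only [hlt, if_true]
    rw [ih hxtail.2 hR]
    simp [hcount]
  | case4 x xs y ys hlt hgt ih =>
    have hytail := List.pairwise_cons.mp hR
    rw [mergeSim]
    simp only [hlt, if_false, hgt, if_true]
    rw [ih hL hytail.2]
    congr 1
    apply List.map_congr_left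
    intro z hz
    have hxz : x ≤ z := by
      rcases List.mem_cons.mp hz with h | h
      · omega
      · exact (List.pairwise_cons.mp hL).1 z h
    have hzy : ¬ y = z := by omega
    simp [hzy]
  | case5 x xs y ys hlt hgt p q ih =>
    have hxy : x = y := by omega
    subst hxy
    have hpq : p = stripRun x xs := rfl
    have hqq : q = stripRun x ys := rfl
    rw [hpq, hqq] at ih
    have hLtail := List.pairwise_cons.mp hL
    have hRtail := List.pairwise_cons.mp hR
    have hxs := stripRun_decomp x xs
    have hys := stripRun_decomp x ys
    have hxs_gt := stripRun_rest_gt x xs hLtail.2 hLtail.1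
    have hys_gt := stripRun_rest_gt x ys hRtail.2 hRtail.1
    have hxs_sorted := stripRun_rest_sorted x xs hLtail.2
    have hys_sorted := stripRun_rest_sorted x ys hRtail.2
    have hrec := ih hxs_sorted hys_sorted
    simp only [mergeSim, if_neg hlt]
    rw [hrec]
    set cL := (stripRun x xs).1 with hcL
    set rL := (stripRun x xs).2 with hrL
    set cR := (stripRun x ys).1 with hcR
    set rR := (stripRun x ys).2 with hrR
    have h0R : rR.count x = 0 := List.count_eq_zero.mpr (fun h => absurd (hys_gt x h) (lt_irrefl x))
    have hcount_x : (x :: ys).count x = cR + 1 := by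
      rw [List.count_cons_self, hys, List.count_append, List.count_replicate]
      simp [h0R]
    have hcount_z : ∀ z ∈ rL, (x :: ys).count z = rR.count z := by
      intro z hzmem
      have hzx : x < z := hxs_gt z hzmem
      have hne' : ¬ x = z := by omega
      rw [List.count_cons, hys, List.count_append, List.count_replicate]
      simp [hne']
    rw [List.map_cons, List.sum_cons, hcount_x]
    conv_rhs => rw [hxs]
    rw [List.map_append, List.sum_append, List.map_replicate, List.sum_replicate]
    have hmapr : rL.map (fun z => z * (((x :: ys).count z : Nat) : Int))
        = rL.map (fun z => z * (rR.count z : Int)) :=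
      List.map_congr_left (fun z hz => by rw [hcount_z z hz])
    rw [hmapr, nsmul_eq_mul, hcount_x]
    push_cast
    ring

-- ===== VERDICT (by name: the statement is the Claim_ definition above) =====
theorem part_2_spec : Claim_equal_part_2 := by
  intro l r _
  unfold Spec_part_2 part_2_alt
  rw [part_2_eval]
  rw [mergeSim_eq_sum _ _
        (by simpa using PySem.List.sorted_pairwise (xs := l) (key := fun x => x))
        (by simpa using PySem.List.sorted_pairwise (xs := r) (key := fun x => x))]
  have hpermL : (PySem.List.sorted l (fun x => x) false).Perm l := PySem.List.sorted_perm ..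
  have hpermR : (PySem.List.sorted r (fun x => x) false).Perm r := PySem.List.sorted_perm ..
  have hcount : ∀ z : Int, ((PySem.List.sorted r (fun x => x) false).count z : Int) = (r.count z : Int) := by
    intro z
    exact_mod_cast hpermR.count_eq z
  have hmap : (PySem.List.sorted l (fun x => x) false).map (fun z => z * ((PySem.List.sorted r (fun x => x) false).count z : Int))
      = (PySem.List.sorted l (fun x => x) false).map (fun z => z * (r.count z : Int)) := by
    apply List.map_congr_left
    intro z _
    rw [hcount]
  rw [hmap]
  exact (List.Perm.sum_eq (hpermL.map _)).symm
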